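-- pv_equiv track=rewrite | github.com/ZiweiHu1206/python-projects | dict_practice.py | get_max_value
-- ===== SOURCE A (Python) =====
-- def get_max_value(d):
--     """ (dict) -> int
--     Returns the largest value in the d.
--     >>> get_max_value({'a':3, 'b':2, 'c':3, 'd':5, 'e':0, 'f':3})
--     5
--     """
--     value_list = []
--     for key in d:
--         value_list.append(d[key])
--
--     if len(d) == 0:
--         return None
--
--     largest_value = max(value_list)
--
--     return largest_value
-- ===== SOURCE B (Python) =====
-- def get_max_value(d):
--     largest = 0
--     first = True
--     for value in d.values():
--         if first or value > largest:
--             largest = value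
--             first = False
--     if first:
--         return None
--     return largest
-- ===== Notes on version B (the rewrite author's own statement) =====
-- stated objective: alternative
-- what changed: B replaces A's collect-all-values-into-a-list-then-call-max decomposition by a single-pass running maximum over d.values() with a first-element flag, never materialising the value list.
import Mathlib
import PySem

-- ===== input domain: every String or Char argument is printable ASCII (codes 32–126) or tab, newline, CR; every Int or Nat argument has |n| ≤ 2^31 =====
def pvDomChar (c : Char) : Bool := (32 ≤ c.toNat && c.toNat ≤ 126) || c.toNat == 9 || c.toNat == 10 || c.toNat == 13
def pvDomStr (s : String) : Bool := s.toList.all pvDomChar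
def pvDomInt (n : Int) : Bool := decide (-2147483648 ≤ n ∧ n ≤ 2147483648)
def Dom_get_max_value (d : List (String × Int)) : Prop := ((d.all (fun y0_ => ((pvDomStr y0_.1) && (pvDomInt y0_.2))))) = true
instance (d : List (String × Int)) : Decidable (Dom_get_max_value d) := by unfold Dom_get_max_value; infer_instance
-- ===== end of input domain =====

-- B replaces A's collect-values-into-a-list-then-max decomposition by a single-pass
-- running maximum over the values with a first-element flag.

-- ===== PORT A =====
-- A: build value_list by looking each key up in the dict, then return None if empty, else max(value_list).
-- (d[key] always succeeds here since key ranges over the dict's own keys; getD k 0 is that lookup.)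
def get_max_value (d : List (String × Int)) : Option Int :=
  let dct := PySem.Dict.ofList d
  let value_list := dct.keys.foldl (fun acc k => acc ++ [dct.getD k 0]) []
  if dct.size = 0 then none
  else PySem.List.max? value_list (fun y => y)

-- ===== PORT B =====
-- B: running maximum over d.values() with a (first, largest) state, no list built.
def get_max_value_alt (d : List (String × Int)) : Option Int :=
  let st := (PySem.Dict.ofList d).values.foldl
    (fun (st : Bool × Int) v => if st.1 || v > st.2 then (false, v) else st) (true, 0)
  if st.1 then none else some st.2

-- ===== PRECONDITION & SPEC =====
def Spec_get_max_value (d : List (String × Int)) (out : Option Int) : Prop := out = get_max_value_alt d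
instance (d : List (String × Int)) (out : Option Int) : Decidable (Spec_get_max_value d out) := by unfold Spec_get_max_value; infer_instance

-- ===== CLAIM (what is proved, stated in full; the proofs are below) =====
def Claim_equal_get_max_value : Prop := ∀ (d : List (String × Int)), Dom_get_max_value d → Spec_get_max_value d (get_max_value d)

-- ===== LEMMAS AND PROOFS =====

-- the key→lookup loop of A rebuilds exactly the dict's value list
theorem pv_value_list_eq (dct : PySem.Dict String Int) (h : dct.keys.Nodup) :
    dct.keys.foldl (fun acc k => acc ++ [dct.getD k 0]) [] = dct.values := by
  rw [PySem.List.foldl_append_singleton_eq_map, List.nil_append]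
  rw [show dct.keys = dct.items.map (·.1) from rfl,
      show dct.values = dct.items.map (·.2) from rfl, List.map_map]
  apply List.map_congr_left
  rintro ⟨k, v⟩ hp
  exact PySem.Dict.getD_of_mem_items (d := dct) (k := k) (v := v) (d0 := 0) hp h

-- B's loop after the first element is the plain running max
theorem pv_fold_false (t : List Int) (a : Int) :
    t.foldl (fun (st : Bool × Int) v => if st.1 || v > st.2 then (false, v) else st) (false, a)
      = (false, t.foldl max a) := by
  induction t generalizing a with
  | nil => rfl
  | cons x t ih =>
    simp only [List.foldl_cons]
    by_cases hx : x > a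
    · rw [if_pos (by simp [hx]), ih, max_eq_right (le_of_lt hx)]
    · rw [if_neg (by simp [le_of_not_gt hx]), ih, max_eq_left (le_of_not_gt hx)]

theorem pv_fold_eq_max? (vals : List Int) :
    (if (vals.foldl (fun (st : Bool × Int) v => if st.1 || v > st.2 then (false, v) else st) (true, 0)).1
       then (none : Option Int)
       else some (vals.foldl (fun (st : Bool × Int) v => if st.1 || v > st.2 then (false, v) else st) (true, 0)).2)
      = PySem.List.max? vals (fun y => y) := by
  cases vals with
  | nil => simp [PySem.List.max?]
  | cons x t =>
    have h1 : (if ((((true, 0) : Bool × Int)).1 || decide (x > (((true, 0) : Bool × Int)).2)) = true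
        then ((false, x) : Bool × Int) else ((true, 0) : Bool × Int)) = (false, x) := by simp
    rw [List.foldl_cons, h1, pv_fold_false, PySem.List.max?_id_cons]
    simp

-- ===== VERDICT (by name: the statement is the Claim_ definition above) =====
theorem get_max_value_spec : Claim_equal_get_max_value := by
  intro d _
  show get_max_value d = get_max_value_alt d
  unfold get_max_value get_max_value_alt
  simp only []
  rw [pv_value_list_eq _ (PySem.Dict.nodup_keys_ofList d), ← pv_fold_eq_max?]
  by_cases h : (PySem.Dict.ofList d).size = 0
  · have : (PySem.Dict.ofList d).values = [] := by
      have := List.length_eq_zero_iff.mp h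
      simp [PySem.Dict.values, this]
    simp [h, this]
  · have hne : (PySem.Dict.ofList d).values ≠ [] := by
      intro hc
      apply h
      have : (PySem.Dict.ofList d).items = [] := by
        cases hi : (PySem.Dict.ofList d).items with
        | nil => rfl
        | cons p t => simp [PySem.Dict.values, hi] at hc
      simp [PySem.Dict.size, this]
    cases hv : (PySem.Dict.ofList d).values with
    | nil => exact absurd hv hne
    | cons x t =>
      simp [h, List.foldl_cons]
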